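-- pv_equiv track=rewrite | github.com/NadiyaSitdykova/RosalindProblems | ErrorCorrectionReads.py | singe_mismatch_position
-- ===== SOURCE A (Python) =====
-- def singe_mismatch_position(s1, s2):
--     mismatch_pos = -1
--     for i in range(len(s1)):
--         if s1[i] != s2[i]:
--             if mismatch_pos != -1:
--                 return -1
--             mismatch_pos = i
--     return mismatch_pos
-- ===== SOURCE B (Python) =====
-- def singe_mismatch_position(s1, s2):
--     n = len(s1)
--     i = 0
--     while i < n and s1[i] == s2[i]:
--         i += 1
--     if i == n:
--         return -1
--     j = n - 1
--     while s1[j] == s2[j]: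
--         j -= 1
--     return i if i == j else -1
-- ===== Notes on version B (the rewrite author's own statement) =====
-- stated objective: alternative
-- what changed: Replaces A's single left-to-right scan with mismatch-position state and early exit by a bidirectional two-pointer algorithm: find the first mismatch from the front and the first mismatch from the back, and return the index only if the two pointers meet.
-- outside the precondition, e.g. on singe_mismatch_position('abb', 'xy'): A returns -1, B raises IndexError
import Mathlib
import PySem

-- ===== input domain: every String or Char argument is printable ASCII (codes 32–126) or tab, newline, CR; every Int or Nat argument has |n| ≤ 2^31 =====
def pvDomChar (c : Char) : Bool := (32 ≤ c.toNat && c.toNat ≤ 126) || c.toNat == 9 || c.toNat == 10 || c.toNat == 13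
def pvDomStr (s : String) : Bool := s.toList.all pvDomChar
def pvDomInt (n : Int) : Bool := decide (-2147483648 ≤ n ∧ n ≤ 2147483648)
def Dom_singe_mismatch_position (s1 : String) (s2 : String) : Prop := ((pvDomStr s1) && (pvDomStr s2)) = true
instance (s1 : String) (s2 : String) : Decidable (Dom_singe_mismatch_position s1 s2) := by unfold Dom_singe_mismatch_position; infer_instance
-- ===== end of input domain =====

-- B replaces A's stateful one-directional scan by a bidirectional two-pointer algorithm
-- (first mismatch from the front, first mismatch from the back, answer only if they meet);
-- objective: alternative algorithm, same O(n) cost.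


-- ===== PORT A =====
-- A's loop: index i over range(len(s1)), state mismatch_pos; second mismatch returns -1 early.
-- The (l1 nonempty, l2 empty) case is Python's IndexError, excluded by Pre_ below.
def pvAGo : List Char → List Char → Int → Int → Int
  | [], _, _, pos => pos
  | _ :: _, [], _, _ => -1
  | c1 :: t1, c2 :: t2, i, pos =>
      if c1 ≠ c2 then
        if pos ≠ -1 then -1 else pvAGo t1 t2 (i + 1) i
      else pvAGo t1 t2 (i + 1) pos

def singe_mismatch_position (s1 : String) (s2 : String) : Int :=
  pvAGo s1.toList s2.toList 0 (-1)

-- ===== PORT B =====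
-- front scan: 'while i < n and s1[i] == s2[i]: i += 1' — structural recursion over both lists,
-- returning how far the equal prefix extends (the (cons, nil) case is Python's IndexError,
-- excluded by Pre_ below; 0 there is a dummy value).
def pvFront : List Char → List Char → Nat
  | [], _ => 0
  | _ :: _, [] => 0
  | a :: t1, b :: t2 => if a = b then pvFront t1 t2 + 1 else 0

-- back scan: 'while s1[j] == s2[j]: j -= 1' — recursion on the index j; Python only reaches
-- j = 0 when a mismatch is guaranteed there (a front mismatch exists at i ≤ j), so the base
-- case returns 0.
def pvBack (l1 l2 : List Char) : Nat → Nat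
  | 0 => 0
  | j + 1 => if l1.getD (j + 1) ' ' = l2.getD (j + 1) ' ' then pvBack l1 l2 j else j + 1

def singe_mismatch_position_alt (s1 : String) (s2 : String) : Int :=
  let l1 := s1.toList
  let l2 := s2.toList
  let n := l1.length
  let i := pvFront l1 l2
  if i = n then -1
  else
    let j := pvBack l1 l2 (n - 1)
    if i = j then (i : Int) else -1

-- ===== PRECONDITION & SPEC =====
-- Pre_ excludes s2 shorter than s1: there A raises IndexError (except when a second mismatch
-- occurs before the scan runs off s2's end, where it early-returns -1), while B's front or
-- back scan always raises IndexError on such inputs.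
def Pre_singe_mismatch_position (s1 : String) (s2 : String) : Prop :=
  s1.toList.length ≤ s2.toList.length
instance (s1 : String) (s2 : String) : Decidable (Pre_singe_mismatch_position s1 s2) := by
  unfold Pre_singe_mismatch_position; infer_instance

def pvWitness_singe_mismatch_position : String × String := ("abc", "axc")

def Spec_singe_mismatch_position (s1 : String) (s2 : String) (out : Int) : Prop := out = singe_mismatch_position_alt s1 s2
instance (s1 : String) (s2 : String) (out : Int) : Decidable (Spec_singe_mismatch_position s1 s2 out) := by unfold Spec_singe_mismatch_position; infer_instance

-- ===== CLAIM (what is proved, stated in full; the proofs are below) =====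
def Claim_equal_singe_mismatch_position : Prop := ∀ (s1 : String) (s2 : String), Dom_singe_mismatch_position s1 s2 → Pre_singe_mismatch_position s1 s2 → Spec_singe_mismatch_position s1 s2 (singe_mismatch_position s1 s2)

-- ===== LEMMAS AND PROOFS =====

-- the list of (0-based) positions where the two lists differ, over s1's indices
def pvD0 : List Char → List Char → List Nat
  | a :: t1, b :: t2 => (if a ≠ b then [0] else []) ++ (pvD0 t1 t2).map (· + 1)
  | _, _ => []

theorem pvAGo_pos (l1 l2 : List Char) (h : l1.length ≤ l2.length) :
    ∀ (i p : Int), p ≠ -1 →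
      pvAGo l1 l2 i p = if pvD0 l1 l2 = [] then p else -1 := by
  induction l1 generalizing l2 with
  | nil => intro i p hp; simp [pvAGo, pvD0]
  | cons a t1 ih =>
      intro i p hp
      cases l2 with
      | nil => simp at h
      | cons b t2 =>
          have ht : t1.length ≤ t2.length := by simpa using h
          by_cases hab : a = b
          · simpa [pvAGo, pvD0, hab] using ih t2 ht (i + 1) p hp
          · simp [pvAGo, pvD0, hab, hp]

theorem pvAGo_neg (l1 l2 : List Char) (h : l1.length ≤ l2.length) :
    ∀ (i : Int), 0 ≤ i →
      pvAGo l1 l2 i (-1) =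
        match pvD0 l1 l2 with
        | [] => -1
        | [j] => i + (j : Int)
        | _ :: _ :: _ => -1 := by
  induction l1 generalizing l2 with
  | nil => intro i _; simp [pvAGo, pvD0]
  | cons a t1 ih =>
      intro i hi
      cases l2 with
      | nil => simp at h
      | cons b t2 =>
          have ht : t1.length ≤ t2.length := by simpa using h
          by_cases hab : a = b
          · rw [show pvAGo (a :: t1) (b :: t2) i (-1) = pvAGo t1 t2 (i + 1) (-1) from by
              simp [pvAGo, hab]]
            rw [ih t2 ht (i + 1) (by omega)]
            simp only [pvD0, hab, ne_eq, not_true_eq_false, if_false, List.nil_append]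
            cases hd : pvD0 t1 t2 with
            | nil => simp
            | cons x xs =>
                cases xs with
                | nil => simp; ring
                | cons y ys => simp
          · rw [show pvAGo (a :: t1) (b :: t2) i (-1) = pvAGo t1 t2 (i + 1) i from by
              simp [pvAGo, hab]]
            rw [pvAGo_pos t1 t2 ht (i + 1) i (by omega)]
            simp only [pvD0, hab, ne_eq, not_false_eq_true, if_true, List.singleton_append]
            cases hd : pvD0 t1 t2 with
            | nil => simp
            | cons x xs => simp

-- membership in pvD0 = in-range mismatch position
theorem pvD0_mem (l1 l2 : List Char) (h : l1.length ≤ l2.length) (k : Nat) :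
    k ∈ pvD0 l1 l2 ↔ k < l1.length ∧ l1.getD k ' ' ≠ l2.getD k ' ' := by
  induction l1 generalizing l2 k with
  | nil => simp [pvD0]
  | cons a t1 ih =>
      cases l2 with
      | nil => simp at h
      | cons b t2 =>
          have ht : t1.length ≤ t2.length := by simpa using h
          cases k with
          | zero => by_cases hab : a = b <;> simp [pvD0, hab]
          | succ k =>
              by_cases hab : a = b <;>
                simp [pvD0, hab, ih t2 ht k]

theorem pvD0_sorted (l1 l2 : List Char) : List.Pairwise (· < ·) (pvD0 l1 l2) := by
  induction l1 generalizing l2 with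
  | nil => simp [pvD0]
  | cons a t1 ih =>
      cases l2 with
      | nil => simp [pvD0]
      | cons b t2 =>
          by_cases hab : a = b <;>
            simp [pvD0, hab, List.pairwise_map] <;>
            exact (ih t2).imp (by omega)

-- the front scan is the head of the mismatch list (or the length if there is none)
theorem pvFront_eq (l1 l2 : List Char) (h : l1.length ≤ l2.length) :
    pvFront l1 l2 = (pvD0 l1 l2).headD l1.length := by
  induction l1 generalizing l2 with
  | nil => simp [pvFront, pvD0]
  | cons a t1 ih =>
      cases l2 with
      | nil => simp at h
      | cons b t2 =>
          have ht : t1.length ≤ t2.length := by simpa using h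
          by_cases hab : a = b
          · rw [show pvFront (a :: t1) (b :: t2) = pvFront t1 t2 + 1 from by simp [pvFront, hab]]
            rw [ih t2 ht]
            simp only [pvD0, hab, ne_eq, not_true_eq_false, if_false, List.nil_append]
            cases pvD0 t1 t2 <;> simp
          · simp [pvFront, pvD0, hab]

-- in a strictly sorted list every element is ≤ the last
theorem pvLast_max (l : List Nat) (hs : List.Pairwise (· < ·) l) (hne : l ≠ []) :
    ∀ a ∈ l, a ≤ l.getLast hne := by
  induction l with
  | nil => simp at hne
  | cons x xs ih =>
      intro a ha
      rcases List.mem_cons.mp ha with rfl | ha'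
      · cases xs with
        | nil => simp
        | cons y ys =>
            rw [List.getLast_cons (by simp)]
            have hy : a < y := (List.pairwise_cons.mp hs).1 y (by simp)
            have hle := ih (List.pairwise_cons.mp hs).2 (by simp) y (by simp)
            exact le_trans (le_of_lt hy) hle
      · cases xs with
        | nil => simp at ha'
        | cons y ys =>
            rw [List.getLast_cons (by simp)]
            exact ih (List.pairwise_cons.mp hs).2 (by simp) a ha'

-- the back scan finds the greatest mismatch position ≤ j
theorem pvBack_eq (l1 l2 : List Char) (h : l1.length ≤ l2.length)
    (m : Nat) (hm : m ∈ pvD0 l1 l2) (hmax : ∀ k ∈ pvD0 l1 l2, k ≤ m) :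
    ∀ j, j < l1.length → m ≤ j → pvBack l1 l2 j = m := by
  intro j
  induction j with
  | zero => intro _ hmj; have : m = 0 := Nat.le_zero.mp hmj; simp [pvBack, this]
  | succ j ih =>
      intro hj hmj
      by_cases hm' : m = j + 1
      · have hmm := ((pvD0_mem l1 l2 h m).mp hm).2
        rw [hm'] at hmm
        simp only [List.getD] at hmm
        simp [pvBack, hmm, hm']
      · have hmj' : m ≤ j := by omega
        have hnot : j + 1 ∉ pvD0 l1 l2 := fun hc => by
          have := hmax _ hc; omega
        have heq : l1.getD (j + 1) ' ' = l2.getD (j + 1) ' ' := by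
          by_contra hne
          exact hnot ((pvD0_mem l1 l2 h (j + 1)).mpr ⟨hj, hne⟩)
        simp only [List.getD] at heq
        rw [show pvBack l1 l2 (j + 1) = pvBack l1 l2 j from by simp [pvBack, heq]]
        exact ih (by omega) hmj'

-- every mismatch position is < length
theorem pvD0_lt (l1 l2 : List Char) (h : l1.length ≤ l2.length) :
    ∀ k ∈ pvD0 l1 l2, k < l1.length := fun k hk => ((pvD0_mem l1 l2 h k).mp hk).1

-- ===== VERDICT (by name: the statement is the Claim_ definition above) =====
theorem singe_mismatch_position_spec : Claim_equal_singe_mismatch_position := by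
  intro s1 s2 _ hpre
  unfold Spec_singe_mismatch_position singe_mismatch_position singe_mismatch_position_alt
  set l1 := s1.toList with hl1
  set l2 := s2.toList with hl2
  have h : l1.length ≤ l2.length := hpre
  rw [pvAGo_neg l1 l2 h 0 le_rfl]
  simp only [pvFront_eq l1 l2 h]
  cases hd : pvD0 l1 l2 with
  | nil => simp
  | cons x xs =>
      have hx : x < l1.length := pvD0_lt l1 l2 h x (by rw [hd]; simp)
      have hne : (x : Nat) ≠ l1.length := by omega
      have hs := pvD0_sorted l1 l2
      rw [hd] at hs
      cases hxs : xs with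
      | nil =>
          subst hxs
          have hback : pvBack l1 l2 (l1.length - 1) = x := by
            apply pvBack_eq l1 l2 h x (by rw [hd]; simp)
            · intro k hk; rw [hd] at hk; simp at hk; omega
            · omega
            · omega
          simp [hne, hback]
      | cons y ys =>
          subst hxs
          -- last element is the max; it is > x, so the two pointers do not meet
          have hlast_mem : (x :: y :: ys).getLast (by simp) ∈ pvD0 l1 l2 := by
            rw [hd]; exact List.getLast_mem _
          have hmax : ∀ k ∈ pvD0 l1 l2, k ≤ (x :: y :: ys).getLast (by simp) := by
            intro k hk; rw [hd] at hk
            exact pvLast_max _ hs (by simp) k hk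
          have hlast_lt : (x :: y :: ys).getLast (by simp) < l1.length :=
            pvD0_lt l1 l2 h _ hlast_mem
          have hback : pvBack l1 l2 (l1.length - 1) = (x :: y :: ys).getLast (by simp) := by
            apply pvBack_eq l1 l2 h _ hlast_mem hmax
            · omega
            · omega
          have hxlt : x < (x :: y :: ys).getLast (by simp) := by
            have hy : x < y := (List.pairwise_cons.mp hs).1 y (by simp)
            have : y ≤ (x :: y :: ys).getLast (by simp) := by
              apply hmax; rw [hd]; simp
            omega
          simp only [List.headD_cons]
          rw [if_neg hne, hback, if_neg (by omega)]
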